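-- pv_equiv track=rewrite | github.com/dnelisee/Projects | Python/Algos/calco_polonaise-piles.py | tri_wagons
-- ===== SOURCE A (Python) =====
-- def tri_wagons(train : str) -> str :
--     """
--     Cette fonction trie le train en mettant d'abord les nombres
--     en debut de chaîne puis les lettres en fin de chaîne.
--     Exemple : train = "4 C 5 D 7 F E" donc tri_wagons(train) renvoie
--     "4 5 7 C D F E".
--     """
--     result = []
--     temp = []
--     train = train.split()
--     for x in train :
--         if x.isdigit() :
--             result += [x]
--         else :
--             temp += [x]
--
--     result += temp
--     return " ".join(result)
-- ===== SOURCE B (Python) =====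
-- def tri_wagons(train : str) -> str :
--     """Stable partition via a stable sort on a two-valued key: digit tokens
--     (key 0) keep their order ahead of the other tokens (key 1)."""
--     return " ".join(sorted(train.split(), key=lambda x: 0 if x.isdigit() else 1))
-- ===== Notes on version B (the rewrite author's own statement) =====
-- stated objective: idiomatic
-- what changed: Replaces the explicit two-accumulator partition loop by a single expression: a stable sort on the two-valued key (0 for digit tokens, 1 for the rest), relying on sort stability to keep each group in original order.
import Mathlib
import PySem

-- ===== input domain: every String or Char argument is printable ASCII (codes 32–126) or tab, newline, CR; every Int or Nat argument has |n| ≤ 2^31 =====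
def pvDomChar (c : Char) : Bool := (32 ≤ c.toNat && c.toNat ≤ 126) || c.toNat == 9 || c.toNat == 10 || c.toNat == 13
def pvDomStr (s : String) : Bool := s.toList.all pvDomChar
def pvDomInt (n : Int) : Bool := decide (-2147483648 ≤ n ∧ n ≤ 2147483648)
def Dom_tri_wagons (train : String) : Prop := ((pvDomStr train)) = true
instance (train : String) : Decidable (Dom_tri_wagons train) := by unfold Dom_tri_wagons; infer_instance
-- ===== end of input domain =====

-- B replaces A's explicit two-accumulator partition loop by " ".join(sorted(tokens, key = 0/1)),
-- relying on the stability of the sort; proved equal on all inputs.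


-- ===== PORT A =====
def tri_wagons (train : String) : String :=
  let tokens := PySem.Str.split₀ train
  let st := tokens.foldl
    (fun (st : List String × List String) x =>
      if PySem.Str.strIsdigit x then (st.1 ++ [x], st.2) else (st.1, st.2 ++ [x]))
    ([], [])
  PySem.Str.join " " (st.1 ++ st.2)

-- ===== PORT B =====
def pvKey (x : String) : Int := if PySem.Str.strIsdigit x then 0 else 1

def tri_wagons_alt (train : String) : String :=
  PySem.Str.join " " (PySem.List.sorted (PySem.Str.split₀ train) pvKey)

-- ===== PRECONDITION & SPEC =====
def Spec_tri_wagons (train : String) (out : String) : Prop := out = tri_wagons_alt train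
instance (train : String) (out : String) : Decidable (Spec_tri_wagons train out) := by unfold Spec_tri_wagons; infer_instance

-- ===== CLAIM (what is proved, stated in full; the proofs are below) =====
def Claim_equal_tri_wagons : Prop := ∀ (train : String), Dom_tri_wagons train → Spec_tri_wagons train (tri_wagons train)

-- ===== LEMMAS AND PROOFS =====

lemma insertBy_append_of_not_before {α : Type} (before : α → α → Bool) (x : α)
    (res temp : List α) (h : ∀ y ∈ res, before x y = false) :
    PySem.List.insertBy before x (res ++ temp) = res ++ PySem.List.insertBy before x temp := by
  induction res with
  | nil => simp
  | cons r rs ih =>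
    simp only [List.cons_append, PySem.List.insertBy, h r (by simp)]
    simp only [Bool.false_eq_true, if_false, List.cons.injEq, true_and]
    exact ih (fun y hy => h y (by simp [hy]))

lemma insertBy_digit (x : String) (hx : PySem.Str.strIsdigit x = true)
    (res temp : List String)
    (hres : ∀ y ∈ res, PySem.Str.strIsdigit y = true)
    (htemp : ∀ y ∈ temp, PySem.Str.strIsdigit y = false) :
    PySem.List.insertBy (fun a b => decide (pvKey a < pvKey b)) x (res ++ temp)
      = res ++ x :: temp := by
  rw [insertBy_append_of_not_before _ _ _ _
    (fun y hy => by unfold pvKey; rw [hx, hres y hy]; simp)]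
  cases temp with
  | nil => rfl
  | cons t ts =>
    have ht := htemp t (by simp)
    have hb : decide (pvKey x < pvKey t) = true := by
      unfold pvKey; rw [hx, ht]; simp
    simp only [PySem.List.insertBy, hb, if_true]

lemma insertBy_nondigit (x : String) (hx : PySem.Str.strIsdigit x = false)
    (l : List String) :
    PySem.List.insertBy (fun a b => decide (pvKey a < pvKey b)) x l = l ++ [x] := by
  apply PySem.List.insertBy_of_forall_not_before
  intro y _
  unfold pvKey; rw [hx]
  simp only [Bool.false_eq_true, if_false, decide_eq_false_iff_not, not_lt]
  split <;> omega

lemma partition_eq_foldl_insertBy (ts : List String) :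
    ∀ (res temp : List String),
      (∀ y ∈ res, PySem.Str.strIsdigit y = true) →
      (∀ y ∈ temp, PySem.Str.strIsdigit y = false) →
      ts.foldl (fun acc x => PySem.List.insertBy (fun a b => decide (pvKey a < pvKey b)) x acc)
          (res ++ temp)
        = (ts.foldl (fun (st : List String × List String) x =>
             if PySem.Str.strIsdigit x then (st.1 ++ [x], st.2) else (st.1, st.2 ++ [x]))
             (res, temp)).1
          ++ (ts.foldl (fun (st : List String × List String) x =>
             if PySem.Str.strIsdigit x then (st.1 ++ [x], st.2) else (st.1, st.2 ++ [x]))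
             (res, temp)).2 := by
  induction ts with
  | nil => intro res temp _ _; rfl
  | cons x ts ih =>
    intro res temp hres htemp
    by_cases hx : PySem.Str.strIsdigit x = true
    · simp only [List.foldl_cons, hx, if_true]
      rw [insertBy_digit x hx res temp hres htemp]
      have : res ++ x :: temp = (res ++ [x]) ++ temp := by simp
      rw [this]
      exact ih (res ++ [x]) temp
        (fun y hy => by rcases List.mem_append.mp hy with h | h
                        · exact hres y h
                        · simp at h; subst h; exact hx)
        htemp
    · have hx' : PySem.Str.strIsdigit x = false := by simpa using hx
      simp only [List.foldl_cons, hx', Bool.false_eq_true, if_false]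
      rw [insertBy_nondigit x hx', List.append_assoc]
      exact ih res (temp ++ [x]) hres
        (fun y hy => by rcases List.mem_append.mp hy with h | h
                        · exact htemp y h
                        · simp at h; subst h; exact hx')

-- ===== VERDICT (by name: the statement is the Claim_ definition above) =====
theorem tri_wagons_spec : Claim_equal_tri_wagons := by
  intro train _
  unfold Spec_tri_wagons tri_wagons tri_wagons_alt
  rw [PySem.List.sorted_eq_foldl_insertBy]
  have := partition_eq_foldl_insertBy (PySem.Str.split₀ train) [] []
    (by simp) (by simp)
  simp only [List.nil_append] at this
  rw [this]
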